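-- pv_equiv track=rewrite | github.com/scuranger0625/Leetcode | 3644. Maximum K to Sort a Permutation.py | sortPermutation
-- ===== SOURCE A (Python) =====
-- from typing import List
--
-- def sortPermutation(nums: List[int]) -> int:
--     n = len(nums)
--     # 題意：已經排序就回傳 0
--     if all(nums[i] == i for i in range(n)):
--         return 0
--
--     # 將所有「不在正確位置」的值做 AND
--     k = (1 << n.bit_length()) - 1
--     for i, v in enumerate(nums):
--         if v != i:
--             k &= v
--     return k
-- ===== SOURCE B (Python) =====
-- from typing import List
--
-- def sortPermutation(nums: List[int]) -> int:
--     # Per-bit reconstruction: bit b of the answer is set iff every misplaced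
--     # value has bit b set; the answer is the sum of those bits over the mask's
--     # bit positions. Correct because AND-ing the full mask with the misplaced
--     # values keeps exactly the bits shared by all of them.
--     if all(v == i for i, v in enumerate(nums)):
--         return 0
--     k = 0
--     for b in range(len(nums).bit_length()):
--         if all(v & (1 << b) for i, v in enumerate(nums) if v != i):
--             k += 1 << b
--     return k
-- ===== Notes on version B (the rewrite author's own statement) =====
-- stated objective: alternative
-- what changed: B reconstructs the answer bit by bit: for each bit position of the mask it tests whether every misplaced value has that bit set and adds the bit to the result, instead of A's single AND-fold over the elements starting from the full mask.
import Mathlib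
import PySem

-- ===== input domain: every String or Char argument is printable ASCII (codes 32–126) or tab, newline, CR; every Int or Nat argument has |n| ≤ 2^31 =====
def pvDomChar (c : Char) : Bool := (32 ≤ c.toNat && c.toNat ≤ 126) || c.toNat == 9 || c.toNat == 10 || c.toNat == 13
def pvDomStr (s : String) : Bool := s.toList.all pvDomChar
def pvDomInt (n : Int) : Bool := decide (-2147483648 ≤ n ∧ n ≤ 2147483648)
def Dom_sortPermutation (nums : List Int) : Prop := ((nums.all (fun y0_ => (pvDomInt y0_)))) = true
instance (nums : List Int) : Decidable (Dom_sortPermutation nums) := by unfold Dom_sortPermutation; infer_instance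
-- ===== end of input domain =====

-- B rebuilds the answer bit by bit (for each bit of the mask, test whether every
-- misplaced value has it) instead of A's single AND-fold over the elements.

-- ===== PORT A =====
def sortPermutation (nums : List Int) : Int :=
  if (PySem.List.pyRange 0 (nums.length : Int) 1).all
      (fun i => PySem.List.pyGetD nums i 0 == i) then 0
  else
    (PySem.List.enumerate nums).foldl
      (fun k p => if p.2 != p.1 then PySem.Int.band k p.2 else k)
      ((1:Int) <<< PySem.Int.bitLength ((nums.length : Nat) : Int) - 1)

-- ===== PORT B =====
def sortPermutation_alt (nums : List Int) : Int :=
  if (PySem.List.enumerate nums).all (fun p => p.2 == p.1) then 0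
  else
    (PySem.List.pyRange 0 ((PySem.Int.bitLength ((nums.length : Nat) : Int) : Nat) : Int) 1).foldl
      (fun k b =>
        if ((PySem.List.enumerate nums).filter (fun p => p.2 != p.1)).all
            (fun p => PySem.Int.band p.2 ((1:Int) <<< b.toNat) != 0)
        then k + (1:Int) <<< b.toNat else k) 0

-- ===== PRECONDITION & SPEC =====
def Spec_sortPermutation (nums : List Int) (out : Int) : Prop := out = sortPermutation_alt nums
instance (nums : List Int) (out : Int) : Decidable (Spec_sortPermutation nums out) := by unfold Spec_sortPermutation; infer_instance

-- ===== CLAIM (what is proved, stated in full; the proofs are below) =====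
def Claim_equal_sortPermutation : Prop := ∀ (nums : List Int), Dom_sortPermutation nums → Spec_sortPermutation nums (sortPermutation nums)

-- ===== LEMMAS AND PROOFS =====

-- bit i of a Python int v in its infinite two's-complement representation
def pvBit (v : Int) (i : Nat) : Bool :=
  if 0 ≤ v then v.toNat.testBit i else !((-v - 1).toNat.testBit i)

theorem pv_and_mod_two (k m : Nat) : (k &&& m) % 2 = 1 ↔ (k % 2 = 1 ∧ m % 2 = 1) := by
  have h := Nat.testBit_land k m 0
  simp only [Nat.testBit_zero] at h
  constructor
  · intro hs
    have : (decide (k % 2 = 1) && decide (m % 2 = 1)) = true := by rw [← h]; simp [hs]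
    simpa using this
  · intro ⟨hk, hm⟩
    have : decide ((k &&& m) % 2 = 1) = true := by rw [h]; simp [hk, hm]
    simpa using this

theorem pv_sub_and_testBit (i : Nat) : ∀ (k m : Nat),
    (k - (k &&& m)).testBit i = (k.testBit i && !(m.testBit i)) := by
  induction i with
  | zero =>
    intro k m
    have hle : k &&& m ≤ k := Nat.and_le_left
    have hdiv : (k &&& m) / 2 = k / 2 &&& m / 2 := Nat.and_div_two
    have hle2 : k / 2 &&& m / 2 ≤ k / 2 := Nat.and_le_left
    have hland := pv_and_mod_two k m
    simp only [Nat.testBit_zero]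
    rcases Nat.mod_two_eq_zero_or_one k with hk | hk <;>
      rcases Nat.mod_two_eq_zero_or_one m with hm | hm <;>
      simp [hk, hm] <;> omega
  | succ i ih =>
    intro k m
    have hle : k &&& m ≤ k := Nat.and_le_left
    have hdiv : (k &&& m) / 2 = k / 2 &&& m / 2 := Nat.and_div_two
    have hle2 : k / 2 &&& m / 2 ≤ k / 2 := Nat.and_le_left
    have hmod : (k &&& m) % 2 ≤ k % 2 := by
      have := pv_and_mod_two k m
      omega
    have hq : (k - (k &&& m)) / 2 = k / 2 - (k / 2 &&& m / 2) := by omega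
    simp only [Nat.testBit_succ, hq, ih]

theorem pv_band_testBit (k v : Int) (hk : 0 ≤ k) (i : Nat) :
    (PySem.Int.band k v).toNat.testBit i = (k.toNat.testBit i && pvBit v i) := by
  unfold PySem.Int.band pvBit
  by_cases hv : 0 ≤ v
  · simp [hk, hv]
  · simp [hk, hv, pv_sub_and_testBit]

theorem pv_foldl_band_testBit (mis : List Int) : ∀ (k : Int), 0 ≤ k →
    0 ≤ mis.foldl PySem.Int.band k ∧
    ∀ i, (mis.foldl PySem.Int.band k).toNat.testBit i
          = (k.toNat.testBit i && mis.all (fun v => pvBit v i)) := by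
  induction mis with
  | nil =>
    intro k hk
    exact ⟨hk, fun i => by simp⟩
  | cons v t ih =>
    intro k hk
    have hk' : 0 ≤ PySem.Int.band k v := PySem.Int.band_nonneg_of_nonneg_left v hk
    obtain ⟨h1, h2⟩ := ih _ hk'
    refine ⟨h1, fun i => ?_⟩
    simp only [List.foldl_cons, List.all_cons, h2, pv_band_testBit k v hk i, Bool.and_assoc]

theorem pv_band_pow_bne (v : Int) (b : Nat) :
    (PySem.Int.band v ((1:Int) <<< b) != 0) = pvBit v b := by
  have hsh : ((1:Int) <<< b) = ((2 ^ b : Nat) : Int) := by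
    rw [Int.shiftLeft_eq]; push_cast; ring
  rw [PySem.Int.band_comm, hsh]
  have hknn : (0:Int) ≤ ((2 ^ b : Nat) : Int) := by positivity
  have hnn := PySem.Int.band_nonneg_of_nonneg_left v hknn
  have hbit : ∀ i, (PySem.Int.band ((2 ^ b : Nat) : Int) v).toNat.testBit i
      = (decide (b = i) && pvBit v i) := by
    intro i
    rw [pv_band_testBit _ v hknn i, Int.toNat_natCast, Nat.testBit_two_pow]
  cases hpv : pvBit v b
  · have hz : (PySem.Int.band ((2 ^ b : Nat) : Int) v).toNat = 0 := by
      apply Nat.eq_of_testBit_eq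
      intro i
      rw [hbit i, Nat.zero_testBit]
      by_cases hib : b = i
      · subst hib; simp [hpv]
      · simp [hib]
    have hval : PySem.Int.band ((2 ^ b : Nat) : Int) v = 0 := by omega
    rw [hval]
    rfl
  · have hnz : (PySem.Int.band ((2 ^ b : Nat) : Int) v).toNat ≠ 0 := by
      intro h0
      have := hbit b
      rw [h0] at this
      simp [hpv] at this
    have hval : PySem.Int.band ((2 ^ b : Nat) : Int) v ≠ 0 := by omega
    exact bne_iff_ne.mpr hval

theorem pv_add_pow_testBit : ∀ (b a i : Nat), a < 2 ^ b →
    (a + 2 ^ b).testBit i = (decide (i = b) || a.testBit i) := by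
  intro b
  induction b with
  | zero =>
    intro a i h
    interval_cases a
    cases i with
    | zero => simp [Nat.testBit_zero]
    | succ j => simp [Nat.testBit_succ, Nat.zero_testBit]
  | succ b ih =>
    intro a i h
    have h2 : 2 ^ (b + 1) = 2 * 2 ^ b := by ring
    cases i with
    | zero =>
      have hmod : (a + 2 ^ (b + 1)) % 2 = a % 2 := by omega
      have hne : ¬ ((0:Nat) = b + 1) := by omega
      simp only [Nat.testBit_zero, hmod, decide_eq_false hne, Bool.false_or]
    | succ i =>
      have hdiv : (a + 2 ^ (b + 1)) / 2 = a / 2 + 2 ^ b := by omega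
      have ha : a / 2 < 2 ^ b := by omega
      have hiff : (i + 1 = b + 1) ↔ (i = b) := by omega
      simp only [Nat.testBit_succ, hdiv, ih (a / 2) i ha, hiff]

-- per-bit accumulation at the Nat level
def pvT (q : Nat → Bool) (B : Nat) : Nat :=
  (List.range B).foldl (fun k b => if q b then k + 2 ^ b else k) 0

theorem pvT_succ (q : Nat → Bool) (B : Nat) :
    pvT q (B + 1) = if q B then pvT q B + 2 ^ B else pvT q B := by
  unfold pvT
  rw [List.range_succ, List.foldl_append, List.foldl_cons, List.foldl_nil]

theorem pvT_lt (q : Nat → Bool) : ∀ B, pvT q B < 2 ^ B := by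
  intro B
  induction B with
  | zero => norm_num [pvT]
  | succ B ih =>
    rw [pvT_succ]
    have h2 : 2 ^ (B + 1) = 2 ^ B + 2 ^ B := by ring
    split <;> omega

theorem pvT_testBit (q : Nat → Bool) : ∀ B i, (pvT q B).testBit i = (decide (i < B) && q i) := by
  intro B
  induction B with
  | zero => intro i; simp [pvT]
  | succ B ih =>
    intro i
    rw [pvT_succ]
    by_cases hqB : q B = true
    · rw [if_pos hqB, pv_add_pow_testBit B _ i (pvT_lt q B)]
      by_cases hib : i = B
      · rw [hib]; simp [hqB]
      · have h1 : decide (i = B) = false := decide_eq_false hib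
        have h2 : (i < B + 1) ↔ (i < B) := by omega
        rw [h1, Bool.false_or, ih i]
        simp [h2]
    · have hqB' : q B = false := by simpa using hqB
      rw [if_neg hqB, ih i]
      by_cases hib : i = B
      · rw [hib, hqB']; simp
      · have h2 : (i < B + 1) ↔ (i < B) := by omega
        simp [h2]

theorem pv_fold_cast (q : Nat → Bool) : ∀ B : Nat,
    (List.range B).foldl (fun (k : Int) b => if q b then k + (1:Int) <<< b else k) 0
      = ((pvT q B : Nat) : Int) := by
  intro B
  induction B with
  | zero => simp [pvT]
  | succ B ih =>
    rw [List.range_succ, List.foldl_append, List.foldl_cons, List.foldl_nil, ih, pvT_succ]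
    have hsh : ((1:Int) <<< B) = ((2 ^ B : Nat) : Int) := by
      rw [Int.shiftLeft_eq]; push_cast; ring
    split <;> simp [hsh]

-- A's sortedness check equals B's enumerate-based check
theorem pv_guard_eq (nums : List Int) :
    ((PySem.List.pyRange 0 (nums.length : Int) 1).all
        (fun i => PySem.List.pyGetD nums i 0 == i))
      = (PySem.List.enumerate nums).all (fun p => p.2 == p.1) := by
  rw [PySem.List.enumerate_eq_map_pyRange nums 0, List.all_map]
  rfl

-- ===== VERDICT (by name: the statement is the Claim_ definition above) =====
theorem sortPermutation_spec : Claim_equal_sortPermutation := by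
  intro nums _
  unfold Spec_sortPermutation sortPermutation sortPermutation_alt
  rw [pv_guard_eq]
  by_cases hs : (PySem.List.enumerate nums).all (fun p => p.2 == p.1)
  · rw [if_pos hs, if_pos hs]
  · rw [if_neg hs, if_neg hs]
    set B := PySem.Int.bitLength ((nums.length : Nat) : Int) with hB
    set mis := ((PySem.List.enumerate nums).filter (fun p => p.2 != p.1)).map (·.2) with hmis
    set q : Nat → Bool := fun b => mis.all (fun v => pvBit v b) with hq
    have hA : (PySem.List.enumerate nums).foldl
        (fun k p => if p.2 != p.1 then PySem.Int.band k p.2 else k)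
        ((1:Int) <<< B - 1)
        = mis.foldl PySem.Int.band ((1:Int) <<< B - 1) := by
      rw [PySem.List.foldl_if_eq_foldl_filter, hmis, List.foldl_map]
    have hcond : ∀ b : Nat,
        (((PySem.List.enumerate nums).filter (fun p => p.2 != p.1)).all
          (fun p => PySem.Int.band p.2 ((1:Int) <<< b) != 0)) = q b := by
      intro b
      simp only [hq, hmis, List.all_map, Function.comp_def]
      exact List.all_congr rfl (fun p => pv_band_pow_bne p.2 b)
    have h1 : (1:Nat) ≤ 2 ^ B := Nat.one_le_two_pow
    have hmask : ((1:Int) <<< B - 1) = ((2 ^ B - 1 : Nat) : Int) := by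
      rw [Int.shiftLeft_eq]
      push_cast [h1]
      ring
    have hL : mis.foldl PySem.Int.band ((1:Int) <<< B - 1) = ((pvT q B : Nat) : Int) := by
      rw [hmask]
      have hmnn : (0:Int) ≤ ((2 ^ B - 1 : Nat) : Int) := by positivity
      obtain ⟨hnn, hbit⟩ := pv_foldl_band_testBit mis _ hmnn
      have hNat : (mis.foldl PySem.Int.band ((2 ^ B - 1 : Nat) : Int)).toNat = pvT q B := by
        apply Nat.eq_of_testBit_eq
        intro i
        rw [hbit i, Int.toNat_natCast, Nat.testBit_two_pow_sub_one, pvT_testBit q B i]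
      omega
    rw [hA, hL, ← pv_fold_cast q B, PySem.List.pyRange_zero_nat, List.foldl_map]
    congr 1
    funext k b
    simp only [Int.toNat_natCast, Int.shiftLeft_natCast_right]
    rw [hcond b]
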